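-- pv_equiv track=rewrite | github.com/OhadLibai/Basic_Programing_Concepts | task_4_Py/task_4.py | best_mat_mult_time_calc
-- ===== SOURCE A (Python) =====
-- def best_mat_mult_time_calc(L, min_list): #no memoization- launching every recursive call a new list of multiplication!
--     if len(L)==3:
--         min_elem=L[0]*L[1]*L[2]
--         min_list.append(min_elem)
--         return sum(min_list)
--
--     dynm_list=[]
--
--     for i in range(len(L)-2):
--         dynm_list.append(L[i]*L[i+1]*L[i+2])
--     min_elem=min(dynm_list)
--     for j in range(len(L)-2):
--         if L[j]*L[j+1]*L[j+2]== min_elem: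
--             L.pop(j+1)
--             break
--     min_list.append(min_elem)
--
--     return best_mat_mult_time_calc(L,min_list)
-- ===== SOURCE B (Python) =====
-- def best_mat_mult_time_calc(L, min_list):
--     # Iterative one-pass-argmin version; does not mutate L or min_list
--     # (A pops from L and appends to min_list; equivalence is about the return value).
--     xs = list(L)
--     total = sum(min_list)
--     while len(xs) > 3:
--         best_v = xs[0] * xs[1] * xs[2]
--         best_j = 0
--         for j in range(1, len(xs) - 2):
--             v = xs[j] * xs[j + 1] * xs[j + 2]
--             if v < best_v:
--                 best_v, best_j = v, j
--         total += best_v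
--         del xs[best_j + 1]
--     return total + xs[0] * xs[1] * xs[2]
-- ===== Notes on version B (the rewrite author's own statement) =====
-- stated objective: alternative
-- what changed: Replaces A's recursion with three passes per step (build the full products list, take min(), rescan recomputing products to find the pop index) by a single iterative while-loop that finds (min value, first argmin index) in one pass and accumulates the running total directly instead of appending to min_list and summing at the end; B also leaves L and min_list unmutated (constant-factor speedup: one product scan per step instead of three, no recursion or list appends).
import Mathlib
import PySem

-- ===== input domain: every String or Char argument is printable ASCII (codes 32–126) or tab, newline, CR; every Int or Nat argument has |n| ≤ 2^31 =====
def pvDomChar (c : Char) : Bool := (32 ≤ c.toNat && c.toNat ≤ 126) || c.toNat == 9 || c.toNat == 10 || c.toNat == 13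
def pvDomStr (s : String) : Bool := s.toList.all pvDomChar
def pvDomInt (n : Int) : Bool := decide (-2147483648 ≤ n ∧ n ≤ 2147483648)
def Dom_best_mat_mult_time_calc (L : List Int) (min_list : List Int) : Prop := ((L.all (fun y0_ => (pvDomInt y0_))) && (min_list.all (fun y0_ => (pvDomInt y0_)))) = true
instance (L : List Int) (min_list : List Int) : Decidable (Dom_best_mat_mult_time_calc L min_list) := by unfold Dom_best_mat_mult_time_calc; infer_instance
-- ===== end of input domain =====

-- B replaces A's recursion + (build-products pass, min pass, rescan-for-index pass) by a single
-- iterative loop with a one-pass running argmin; equivalence is about the RETURN value only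
-- (A pops from L and appends to min_list in place, B mutates neither).

-- ===== PORT A =====
-- L[i]*L[i+1]*L[i+2]; indices are in range on every input Pre_ admits, so getD's default is never read
def pvProd3 (xs : List Int) (i : Nat) : Int := xs.getD i 0 * xs.getD (i+1) 0 * xs.getD (i+2) 0

-- the recursion of A, fuel = one unit per recursive call (Python recurses on a list one shorter each time)
def pvALoop : Nat → List Int → List Int → Int
  | 0, _, _ => 0                                   -- fuel guard, never reached from the entry point
  | fuel+1, xs, acc =>
    if xs.length = 3 then (acc ++ [pvProd3 xs 0]).sum       -- min_list.append(L[0]*L[1]*L[2]); sum(min_list)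
    else
      let dynm := (List.range (xs.length - 2)).map (pvProd3 xs)   -- dynm_list
      match PySem.List.min? dynm (fun v => v) with                -- min(dynm_list); none = ValueError (len < 3)
      | none => 0
      | some m =>
        -- for j in range(len(L)-2): if L[j]*L[j+1]*L[j+2] == min_elem: L.pop(j+1); break
        match (List.range (xs.length - 2)).find? (fun j => pvProd3 xs j == m) with
        | none => 0                                               -- unreachable: m is a product value
        | some j =>
          match PySem.List.pop? xs ((j : Int) + 1) with           -- L.pop(j+1)
          | none => 0
          | some r => pvALoop fuel r.2 (acc ++ [m])               -- min_list.append(min_elem); recurse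

def best_mat_mult_time_calc (L : List Int) (min_list : List Int) : Int :=
  pvALoop (L.length + 1) L min_list

-- ===== PORT B =====
-- one pass over j in range(1, len(xs)-2) keeping (best_v, best_j); start from the j = 0 triple
def pvArgmin (f : Nat → Int) (k : Nat) : Int × Nat :=
  (List.range' 1 k).foldl (fun b j => if f j < b.1 then (f j, j) else b) (f 0, 0)

-- while len(xs) > 3: find argmin, delete xs[best_j+1], accumulate; then add the last triple product
def pvBLoop : Nat → List Int → Int → Int
  | 0, _, total => total                           -- fuel guard, never reached from the entry point
  | fuel+1, xs, total =>
    if 3 < xs.length then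
      let r := pvArgmin (pvProd3 xs) (xs.length - 3)
      pvBLoop fuel (xs.eraseIdx (r.2 + 1)) (total + r.1)
    else total + pvProd3 xs 0

def best_mat_mult_time_calc_alt (L : List Int) (min_list : List Int) : Int :=
  pvBLoop (L.length + 1) L min_list.sum

-- ===== PRECONDITION & SPEC =====
-- Python A raises (ValueError from min([]) or IndexError) exactly when len(L) < 3.
def Pre_best_mat_mult_time_calc (L : List Int) (min_list : List Int) : Prop := 3 ≤ L.length
instance (L : List Int) (min_list : List Int) : Decidable (Pre_best_mat_mult_time_calc L min_list) := by
  unfold Pre_best_mat_mult_time_calc; infer_instance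

def pvWitness_best_mat_mult_time_calc : List Int × List Int := ([2, 3, 4, 5], [7])

def Spec_best_mat_mult_time_calc (L : List Int) (min_list : List Int) (out : Int) : Prop := out = best_mat_mult_time_calc_alt L min_list
instance (L : List Int) (min_list : List Int) (out : Int) : Decidable (Spec_best_mat_mult_time_calc L min_list out) := by unfold Spec_best_mat_mult_time_calc; infer_instance

-- ===== CLAIM (what is proved, stated in full; the proofs are below) =====
def Claim_equal_best_mat_mult_time_calc : Prop := ∀ (L : List Int) (min_list : List Int), Dom_best_mat_mult_time_calc L min_list → Pre_best_mat_mult_time_calc L min_list → Spec_best_mat_mult_time_calc L min_list (best_mat_mult_time_calc L min_list)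

-- ===== LEMMAS AND PROOFS =====

-- one step of the one-pass argmin
theorem pvArgmin_succ (f : Nat → Int) (k : Nat) :
    pvArgmin f (k+1) = if f (k+1) < (pvArgmin f k).1 then (f (k+1), k+1) else pvArgmin f k := by
  simp [pvArgmin, List.range'_1_concat, Nat.add_comm 1 k]

-- the one-pass argmin computes: the running min of f over 0..k, a lower bound for all of them,
-- and exactly the index A's rescan finds (the FIRST j with f j equal to the min)
theorem pvArgmin_spec (f : Nat → Int) : ∀ k : Nat,
    ((List.range' 1 k).map f).foldl min (f 0) = (pvArgmin f k).1
    ∧ (∀ i, i ≤ k → (pvArgmin f k).1 ≤ f i)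
    ∧ (List.range (k+1)).find? (fun j => f j == (pvArgmin f k).1) = some (pvArgmin f k).2 := by
  intro k
  induction k with
  | zero =>
    refine ⟨rfl, ?_, ?_⟩
    · intro i hi; interval_cases i; simp [pvArgmin]
    · simp [pvArgmin, List.range_one]
  | succ k ih =>
    obtain ⟨hmin, hlb, hfind⟩ := ih
    rw [pvArgmin_succ]
    by_cases hlt : f (k+1) < (pvArgmin f k).1
    · simp only [if_pos hlt]
      refine ⟨?_, ?_, ?_⟩
      · rw [List.range'_1_concat, List.map_append, List.foldl_append, hmin]
        simp [Nat.add_comm 1 k]; omega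
      · intro i hi
        rcases Nat.lt_or_ge i (k+1) with h | h
        · exact le_of_lt (lt_of_lt_of_le hlt (hlb i (by omega)))
        · have : i = k+1 := by omega
          simp [this]
      · rw [List.range_succ, List.find?_append]
        have hnone : (List.range (k+1)).find? (fun j => f j == f (k+1)) = none := by
          rw [List.find?_eq_none]
          intro j hj
          have : j ≤ k := by simpa using Nat.lt_succ_iff.mp (List.mem_range.mp hj)
          have := hlb j this
          simp; omega
        simp [hnone]
    · simp only [if_neg hlt]
      refine ⟨?_, ?_, ?_⟩
      · rw [List.range'_1_concat, List.map_append, List.foldl_append, hmin]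
        simp [Nat.add_comm 1 k]; omega
      · intro i hi
        rcases Nat.lt_or_ge i (k+1) with h | h
        · exact hlb i (by omega)
        · have : i = k+1 := by omega
          rw [this]; omega
      · rw [List.range_succ, List.find?_append, hfind]
        rfl

-- the argmin index stays within 0..k (so A's pop index j+1 is in range)
theorem pvArgmin_idx_le (f : Nat → Int) : ∀ k : Nat, (pvArgmin f k).2 ≤ k := by
  intro k
  induction k with
  | zero => simp [pvArgmin]
  | succ k ih =>
    rw [pvArgmin_succ]
    split <;> omega

-- one recursion step of A equals one loop iteration of B, by induction on the fuel
theorem pvLoop_eq : ∀ (fuel : Nat) (xs acc : List Int),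
    3 ≤ xs.length → xs.length ≤ fuel + 2 → pvALoop fuel xs acc = pvBLoop fuel xs acc.sum := by
  intro fuel
  induction fuel with
  | zero => intro xs acc h3 hf; omega
  | succ fuel ih =>
    intro xs acc h3 hf
    by_cases h : xs.length = 3
    · simp [pvALoop, pvBLoop, h]
    · have h4 : 4 ≤ xs.length := by omega
      set f := pvProd3 xs with hfdef
      have hk : xs.length - 2 = (xs.length - 3) + 1 := by omega
      set k := xs.length - 3 with hkdef
      obtain ⟨hmin, _, hfind⟩ := pvArgmin_spec f k
      have hidx : (pvArgmin f k).2 ≤ k := pvArgmin_idx_le f k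
      -- A's min(dynm_list) is B's running best value
      have hmin' : PySem.List.min? ((List.range (xs.length - 2)).map f) (fun v => v)
          = some (pvArgmin f k).1 := by
        rw [hk]
        have : List.range (k+1) = 0 :: List.range' 1 k := by
          rw [List.range_eq_range']
          exact List.range'_succ
        rw [this, List.map_cons, PySem.List.min?_id_cons, hmin]
      -- A's pop(j+1) succeeds and removes index j+1
      have hpop : PySem.List.pop? xs (((pvArgmin f k).2 : Int) + 1)
          = some (xs[(pvArgmin f k).2 + 1]'(by omega), xs.eraseIdx ((pvArgmin f k).2 + 1)) := by
        have := PySem.List.pop?_natCast xs ((pvArgmin f k).2 + 1) (by omega)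
        simpa using this
      -- unfold one step on each side
      show pvALoop (fuel+1) xs acc = pvBLoop (fuel+1) xs acc.sum
      rw [pvALoop, pvBLoop]
      rw [if_neg h, if_pos (by omega : 3 < xs.length)]
      simp only [← hfdef, ← hkdef, hmin']
      rw [hk, hfind]
      dsimp only
      rw [hpop]
      dsimp only
      have hlen : (xs.eraseIdx ((pvArgmin f k).2 + 1)).length = xs.length - 1 :=
        List.length_eraseIdx_of_lt (by omega)
      rw [ih _ (acc ++ [(pvArgmin f k).1]) (by rw [hlen]; omega) (by rw [hlen]; omega)]
      simp
theorem best_mat_mult_time_calc_spec : Claim_equal_best_mat_mult_time_calc := by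
  unfold Claim_equal_best_mat_mult_time_calc
  intro L min_list _ hpre
  unfold Spec_best_mat_mult_time_calc best_mat_mult_time_calc best_mat_mult_time_calc_alt
  exact pvLoop_eq (L.length + 1) L min_list hpre (by omega)
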